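-- pv_equiv track=rewrite | github.com/cjohlmacher/PythonDataStructures | fs_3_three_odd_numbers/three_odd_numbers.py | three_odd_numbers
-- ===== SOURCE A (Python) =====
-- def three_odd_numbers(nums):
--     """Is the sum of any 3 sequential numbers odd?"
--
--         >>> three_odd_numbers([1, 2, 3, 4, 5])
--         True
--
--         >>> three_odd_numbers([0, -2, 4, 1, 9, 12, 4, 1, 0])
--         True
--
--         >>> three_odd_numbers([5, 2, 1])
--         False
--
--         >>> three_odd_numbers([1, 2, 3, 3, 2])
--         False
--     """
--     if len(nums) < 3:
--         return False
--     running_sum = sum(nums[0:3])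
--     for i in range(3,len(nums)):
--         if running_sum % 2 == 1:
--             return True
--         running_sum -= nums[i-3]
--         running_sum += nums[i]
--     if running_sum % 2 == 1:
--         return True
--     return False
-- ===== SOURCE B (Python) =====
-- def three_odd_numbers(nums):
--     """Is the sum of any 3 sequential numbers odd?"""
--     return any((a + b + c) % 2 == 1 for a, b, c in zip(nums, nums[1:], nums[2:]))
-- ===== Notes on version B (the rewrite author's own statement) =====
-- stated objective: idiomatic
-- what changed: Replaces the guarded running-sum accumulator loop (seed sum, subtract/add per step, trailing final check) with a single any() over zip-built windows of three, testing each window's parity directly; the maintained accumulator and the len<3 guard disappear.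
import Mathlib
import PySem

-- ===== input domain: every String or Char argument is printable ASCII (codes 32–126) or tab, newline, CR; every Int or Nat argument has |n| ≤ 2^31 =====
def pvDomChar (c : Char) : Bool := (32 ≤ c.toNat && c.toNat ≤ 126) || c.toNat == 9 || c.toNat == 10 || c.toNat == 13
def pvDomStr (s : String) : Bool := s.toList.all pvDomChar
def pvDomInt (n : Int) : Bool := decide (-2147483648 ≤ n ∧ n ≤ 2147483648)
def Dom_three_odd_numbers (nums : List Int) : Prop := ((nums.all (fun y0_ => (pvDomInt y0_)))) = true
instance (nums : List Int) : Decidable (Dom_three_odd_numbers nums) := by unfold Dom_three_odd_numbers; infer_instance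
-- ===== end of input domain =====

-- B replaces A's guarded running-sum accumulator loop with a single any() over
-- zip-built windows of three, testing each window's parity directly (idiomatic).

-- ===== PORT A =====
-- the 'for i in range(3, len(nums))' loop with early return, as index recursion
def three_odd_numbers_loop (nums : List Int) (n i rs : Int) : Bool :=
  if _h : i < n then
    if PySem.Int.mod rs 2 == 1 then true
    else three_odd_numbers_loop nums n (i + 1)
      (rs - PySem.List.pyGetD nums (i - 3) 0 + PySem.List.pyGetD nums i 0)
  else
    PySem.Int.mod rs 2 == 1
termination_by (n - i).toNat
decreasing_by omega

def three_odd_numbers (nums : List Int) : Bool :=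
  if nums.length < 3 then false
  else three_odd_numbers_loop nums nums.length 3
    (PySem.List.slice nums (some 0) (some 3)).sum

-- ===== PORT B =====
def three_odd_numbers_alt (nums : List Int) : Bool :=
  ((nums.zip ((PySem.List.slice nums (some 1) none).zip
              (PySem.List.slice nums (some 2) none))).any
    (fun t => PySem.Int.mod (t.1 + t.2.1 + t.2.2) 2 == 1))

-- ===== PRECONDITION & SPEC =====
def Spec_three_odd_numbers (nums : List Int) (out : Bool) : Prop := out = three_odd_numbers_alt nums
instance (nums : List Int) (out : Bool) : Decidable (Spec_three_odd_numbers nums out) := by unfold Spec_three_odd_numbers; infer_instance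

-- ===== CLAIM (what is proved, stated in full; the proofs are below) =====
def Claim_equal_three_odd_numbers : Prop := ∀ (nums : List Int), Dom_three_odd_numbers nums → Spec_three_odd_numbers nums (three_odd_numbers nums)

-- ===== LEMMAS AND PROOFS =====

-- common reference form: structural sliding-window recursion
def windows_odd : List Int → Bool
  | a :: b :: c :: rest =>
      if PySem.Int.mod (a + b + c) 2 == 1 then true else windows_odd (b :: c :: rest)
  | _ => false

theorem mod_two (x : Int) : PySem.Int.mod x 2 = x % 2 :=
  PySem.Int.mod_eq_emod_of_pos (by omega)

theorem alt_eq_windows_odd : ∀ (nums : List Int),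
    three_odd_numbers_alt nums = windows_odd nums
  | [] => by simp [three_odd_numbers_alt, windows_odd]
  | [a] => by
      simp [three_odd_numbers_alt, windows_odd, PySem.List.slice_from_one,
        PySem.List.slice_from _ (by omega : (0:Int) ≤ 2)]
  | [a, b] => by
      simp [three_odd_numbers_alt, windows_odd, PySem.List.slice_from_one,
        PySem.List.slice_from _ (by omega : (0:Int) ≤ 2)]
  | a :: b :: c :: rest => by
      rw [three_odd_numbers_alt, PySem.List.slice_from_one,
        PySem.List.slice_from _ (by omega : (0:Int) ≤ 2)]
      have hrec := alt_eq_windows_odd (b :: c :: rest)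
      rw [three_odd_numbers_alt, PySem.List.slice_from_one,
        PySem.List.slice_from _ (by omega : (0:Int) ≤ 2)] at hrec
      simp only [List.tail_cons, show ((2:Int)).toNat = 2 from rfl,
        List.drop_succ_cons, List.drop] at hrec ⊢
      simp only [List.zip_cons_cons, List.any_cons] at hrec ⊢
      rw [hrec, windows_odd]
      split_ifs with h
      · simp only [h, Bool.true_or]
      · rw [Bool.not_eq_true] at h
        simp only [h, Bool.false_or]
termination_by nums => nums.length

theorem getD_append_cons (pre : List Int) (x : Int) (t : List Int) (d : Int) :
    (pre ++ x :: t).getD pre.length d = x := by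
  induction pre with
  | nil => simp
  | cons p ps ih => simpa using ih

theorem loop_eq_windows (rest : List Int) : ∀ (pre : List Int) (a b c : Int),
    three_odd_numbers_loop (pre ++ a :: b :: c :: rest)
      (pre ++ a :: b :: c :: rest).length ((pre.length : Int) + 3) (a + b + c)
    = windows_odd (a :: b :: c :: rest) := by
  induction rest with
  | nil =>
      intro pre a b c
      rw [three_odd_numbers_loop]
      have hlen : (pre ++ a :: b :: c :: ([] : List Int)).length = pre.length + 3 := by
        simp
      rw [hlen]
      have hnlt : ¬ ((pre.length : Int) + 3 < ((pre.length + 3 : Nat) : Int)) := by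
        push_cast; omega
      rw [dif_neg hnlt, windows_odd]
      split_ifs with h
      · exact h
      · rw [mod_two] at h
        simp at h
        simp [windows_odd]
        omega
  | cons d rest ih =>
      intro pre a b c
      rw [three_odd_numbers_loop]
      have hlt : (pre.length : Int) + 3 < ((pre ++ a :: b :: c :: d :: rest).length : Int) := by
        simp; push_cast; omega
      rw [dif_pos hlt]
      by_cases h : PySem.Int.mod (a + b + c) 2 == 1
      · rw [if_pos h, windows_odd, if_pos h]
      · rw [if_neg h, windows_odd, if_neg h]
        have ha : PySem.List.pyGetD (pre ++ a :: b :: c :: d :: rest)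
            ((pre.length : Int) + 3 - 3) 0 = a := by
          have he : ((pre.length : Int) + 3 - 3) = ((pre.length : Nat) : Int) := by omega
          rw [he, PySem.List.pyGetD_natCast, getD_append_cons]
        have hd : PySem.List.pyGetD (pre ++ a :: b :: c :: d :: rest)
            ((pre.length : Int) + 3) 0 = d := by
          have h1 : pre ++ a :: b :: c :: d :: rest = (pre ++ [a, b, c]) ++ d :: rest := by
            simp
          have h2 : ((pre.length : Int) + 3) = (((pre ++ [a, b, c]).length : Nat) : Int) := by
            push_cast; simp
          rw [h2, h1, PySem.List.pyGetD_natCast, getD_append_cons]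
        rw [ha, hd]
        have hrs : a + b + c - a + d = b + c + d := by ring
        have hpre : pre ++ a :: b :: c :: d :: rest = (pre ++ [a]) ++ b :: c :: d :: rest := by
          simp
        have hi : (pre.length : Int) + 3 + 1 = (((pre ++ [a]).length : Nat) : Int) + 3 := by
          push_cast; simp; omega
        rw [hrs, hi, hpre]
        exact ih (pre ++ [a]) b c d

-- ===== VERDICT (by name: the statement is the Claim_ definition above) =====
theorem three_odd_numbers_spec : Claim_equal_three_odd_numbers := by
  intro nums _
  unfold Spec_three_odd_numbers
  rw [alt_eq_windows_odd]
  match nums with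
  | [] => simp [three_odd_numbers, windows_odd]
  | [a] => simp [three_odd_numbers, windows_odd]
  | [a, b] => simp [three_odd_numbers, windows_odd]
  | a :: b :: c :: rest =>
      unfold three_odd_numbers
      have hlen : ¬ ((a :: b :: c :: rest).length < 3) := by simp
      rw [if_neg hlen]
      have hsum : (PySem.List.slice (a :: b :: c :: rest) (some 0) (some 3)).sum
          = a + b + c := by
        rw [PySem.List.slice_toNat _ (by omega) (by omega)]
        simp; ring
      have h3 : (3 : Int) = ((([] : List Int).length : Nat) : Int) + 3 := by simp
      rw [hsum, h3]
      exact loop_eq_windows rest [] a b c
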